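-- pv_equiv track=rewrite | github.com/tuura/tuura-api | networks/worker.py | bfs
-- ===== SOURCE A (Python) =====
-- from collections import defaultdict
--
-- def get_edge_map(graph):
--     """Return a map: src node -> set of destinations."""
--     result = defaultdict(set)
--     for src, dst in graph["edges"]:
--         result[src].add(dst)
--     return result
--
-- def bfs(graph, root):
--     """Run BFS from a root node.
--
--     Returns:
--         Number of nodes discovered in each round (list)
--     """
--
--     visited = {root}
--     to_visit = {root}
--     edge_map = get_edge_map(graph)
--     node_counts = []
--
--     while True:
--         neighbours = set()  # neighbours of all nodes in `to_visit`
--         for src in to_visit: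
--             neighbours.update(edge_map[src])
--         discovered = neighbours - visited
--         if not discovered:
--             break
--         node_counts.append(len(discovered))
--         to_visit = discovered
--         visited.update(discovered)
--
--     return node_counts
-- ===== SOURCE B (Python) =====
-- from collections import deque
--
--
-- def bfs(graph, root):
--     """Single-source BFS with a FIFO queue; returns nodes discovered per round."""
--     edge_map = {}
--     for src, dst in graph["edges"]:
--         edge_map.setdefault(src, []).append(dst)
--
--     visited = {root}
--     queue = deque([(root, 0)])
--     counts = []
--
--     while queue:
--         node, depth = queue.popleft()
--         if depth > 0:
--             if depth > len(counts):
--                 counts.append(0)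
--             counts[depth - 1] += 1
--         for nxt in edge_map.get(node, []):
--             if nxt not in visited:
--                 visited.add(nxt)
--                 queue.append((nxt, depth + 1))
--     return counts
-- ===== Notes on version B (the rewrite author's own statement) =====
-- stated objective: idiomatic
-- what changed: A advances a whole frontier per round via bulk set-union and set-difference; B is the textbook single-source BFS over a FIFO deque of (node, depth) pairs, marking visited on enqueue and accumulating per-depth counts node by node (adjacency kept as plain lists, deduped by the visited check).
import Mathlib
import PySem

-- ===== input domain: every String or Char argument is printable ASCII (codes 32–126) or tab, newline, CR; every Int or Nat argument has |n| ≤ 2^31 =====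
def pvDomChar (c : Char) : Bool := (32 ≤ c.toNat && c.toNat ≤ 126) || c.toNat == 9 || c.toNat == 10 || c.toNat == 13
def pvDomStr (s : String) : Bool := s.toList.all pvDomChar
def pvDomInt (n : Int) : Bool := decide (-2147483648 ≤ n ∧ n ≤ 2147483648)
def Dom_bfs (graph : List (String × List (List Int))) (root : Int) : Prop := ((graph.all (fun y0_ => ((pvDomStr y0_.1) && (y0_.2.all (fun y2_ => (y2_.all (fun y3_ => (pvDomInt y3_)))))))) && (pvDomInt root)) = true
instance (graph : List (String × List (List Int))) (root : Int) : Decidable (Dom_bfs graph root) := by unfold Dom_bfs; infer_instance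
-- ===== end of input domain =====

-- B replaces A's per-round frontier set-union/set-difference with the textbook deque BFS
-- (visited marked on enqueue, counts per depth); same return value, idiomatic rather than faster.

-- ===== PORT A =====

-- get_edge_map: defaultdict(set); malformed edges (length ≠ 2) raise ValueError in Python,
-- here skipped for totality (excluded by Pre_bfs).
def pvGetEdgeMap (edges : List (List Int)) : PySem.Dict Int (PySem.Set Int) :=
  edges.foldl (fun d e =>
    match e with
    | [src, dst] => PySem.Dict.modify d src [] (fun s => PySem.Set.add s dst)
    | _ => d) PySem.Dict.empty

-- the `while True` loop of A; fuel (edges.length + 1) bounds the number of rounds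
-- (each round adds at least one destination to `visited`).
def pvLoopA (em : PySem.Dict Int (PySem.Set Int)) :
    Nat → PySem.Set Int → PySem.Set Int → List Int → List Int
  | 0, _, _, acc => acc
  | fuel + 1, visited, toVisit, acc =>
    let neighbours : PySem.Set Int :=
      toVisit.foldl (fun s src => PySem.Set.update s (PySem.Dict.getD em src [])) PySem.Set.empty
    let discovered := PySem.Set.diff neighbours visited
    if discovered.isEmpty then acc
    else pvLoopA em fuel (PySem.Set.update visited discovered) discovered
           (acc ++ [PySem.Set.len discovered])

def bfs (graph : List (String × List (List Int))) (root : Int) : List Int :=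
  match (PySem.Dict.mk graph).get? "edges" with
  | none => []  -- Python: KeyError, excluded by Pre_bfs
  | some edges =>
    pvLoopA (pvGetEdgeMap edges) (edges.length + 1)
      (PySem.Set.ofList [root]) (PySem.Set.ofList [root]) []

-- ===== PORT B =====

-- edge_map built with setdefault(src, []).append(dst)  (= d[src] = d.get(src, []) + [dst])
def pvBuildAdj (edges : List (List Int)) : PySem.Dict Int (List Int) :=
  edges.foldl (fun d e =>
    match e with
    | [src, dst] => PySem.Dict.modify d src [] (fun l => l ++ [dst])
    | _ => d) PySem.Dict.empty

-- the `while queue` loop of B; fuel (edges.length + 2) bounds the number of dequeues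
-- (every enqueue after the root marks a fresh destination as visited).
def pvLoopB (adj : PySem.Dict Int (List Int)) :
    Nat → List (Int × Int) → PySem.Set Int → List Int → List Int
  | 0, _, _, counts => counts
  | fuel + 1, queue, visited, counts =>
    match queue with
    | [] => counts
    | (node, depth) :: rest =>
      let counts1 :=
        if 0 < depth then
          let c := if (counts.length : Int) < depth then counts ++ [0] else counts
          PySem.List.pySetD c (depth - 1) (PySem.List.pyGetD c (depth - 1) 0 + 1)
        else counts
      let qv := (PySem.Dict.getD adj node []).foldl
        (fun (qv : List (Int × Int) × PySem.Set Int) nxt =>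
          if PySem.Set.contains qv.2 nxt then qv
          else (qv.1 ++ [(nxt, depth + 1)], PySem.Set.add qv.2 nxt)) (rest, visited)
      pvLoopB adj fuel qv.1 qv.2 counts1

def bfs_alt (graph : List (String × List (List Int))) (root : Int) : List Int :=
  match (PySem.Dict.mk graph).get? "edges" with
  | none => []  -- Python: KeyError, excluded by Pre_bfs
  | some edges =>
    pvLoopB (pvBuildAdj edges) (edges.length + 2) [(root, 0)] (PySem.Set.ofList [root]) []

-- ===== PRECONDITION & SPEC =====
-- Pre_bfs excludes exactly the inputs on which Python A raises: a graph without an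
-- "edges" key (KeyError) or an edge list entry whose length is not 2 (ValueError on unpacking).
def Pre_bfs (graph : List (String × List (List Int))) (root : Int) : Prop :=
  (((PySem.Dict.mk graph).get? "edges").isSome
    && (((PySem.Dict.mk graph).get? "edges").getD []).all (fun e => e.length == 2)) = true
instance (graph : List (String × List (List Int))) (root : Int) : Decidable (Pre_bfs graph root) := by
  unfold Pre_bfs; infer_instance

def pvWitness_bfs : (List (String × List (List Int))) × Int :=
  ([("edges", [[0, 1], [1, 2], [0, 2]])], 0)

def Spec_bfs (graph : List (String × List (List Int))) (root : Int) (out : List Int) : Prop :=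
  out = bfs_alt graph root
instance (graph : List (String × List (List Int))) (root : Int) (out : List Int) :
    Decidable (Spec_bfs graph root out) := by unfold Spec_bfs; infer_instance

-- ===== CLAIM (what is proved, stated in full; the proofs are below) =====
def Claim_equal_bfs : Prop := ∀ (graph : List (String × List (List Int))) (root : Int),
  Dom_bfs graph root → Pre_bfs graph root → Spec_bfs graph root (bfs graph root)

-- ===== LEMMAS AND PROOFS =====

-- proof-side machinery: one abstract "discover new nodes from a frontier" recursion (pvRef)
-- that both ports are reduced to.

def pvStep (p : PySem.Set Int × List Int) (v : Int) : PySem.Set Int × List Int :=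
  if PySem.Set.contains p.1 v then p else (p.1 ++ [v], p.2 ++ [v])

def pvNewL (V l : List Int) : List Int := (l.foldl pvStep (V, [])).2

def pvNew (nbr : Int → List Int) (V F : List Int) : List Int :=
  (F.foldl (fun q u => (nbr u).foldl pvStep q) (V, [])).2

def pvRef (nbr : Int → List Int) : Nat → List Int → List Int → List Int → List Int
  | 0, _, _, acc => acc
  | fuel + 1, V, F, acc =>
    let N := pvNew nbr V F
    if N.isEmpty then acc else pvRef nbr fuel (V ++ N) N (acc ++ [(N.length : Int)])

def pvDsts (edges : List (List Int)) : List Int :=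
  edges.filterMap (fun e => match e with | [_, t] => some t | _ => none)

def pvMu (pool V : List Int) : Nat :=
  ((PySem.Set.ofList pool).filter (fun x => decide (x ∉ V))).length

-- 1: the single-list collection fold threads (visited, out) in lockstep
theorem pvStep_foldl (l : List Int) : ∀ (V A : List Int),
    l.foldl pvStep (V, A) = (V ++ pvNewL V l, A ++ pvNewL V l) := by
  induction l with
  | nil => intro V A; simp [pvNewL]
  | cons v l ih =>
    intro V A
    by_cases hv : v ∈ V
    · have hc : PySem.Set.contains V v = true := (PySem.Set.contains_iff V v).mpr hv
      simp only [List.foldl_cons, pvNewL, pvStep, hc, if_true]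
      exact ih V A
    · have hc : PySem.Set.contains V v = false := by
        cases hb : PySem.Set.contains V v
        · rfl
        · exact absurd ((PySem.Set.contains_iff V v).mp hb) hv
      simp only [List.foldl_cons, pvNewL, pvStep, hc, Bool.false_eq_true, if_false, List.nil_append]
      rw [ih (V ++ [v]) (A ++ [v]), ih (V ++ [v]) [v]]
      simp

theorem pvNewL_cons (V : List Int) (v : Int) (l : List Int) :
    pvNewL V (v :: l) = if v ∈ V then pvNewL V l else v :: pvNewL (V ++ [v]) l := by
  by_cases hv : v ∈ V
  · have hc : PySem.Set.contains V v = true := (PySem.Set.contains_iff V v).mpr hv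
    simp [pvNewL, pvStep, hv]
  · have hc : PySem.Set.contains V v = false := by
      cases hb : PySem.Set.contains V v
      · rfl
      · exact absurd ((PySem.Set.contains_iff V v).mp hb) hv
    simp only [pvNewL, List.foldl_cons, pvStep, hc, Bool.false_eq_true, if_false, hv, List.nil_append]
    rw [pvStep_foldl l (V ++ [v]) [v]]
    simp [pvNewL]

theorem mem_pvNewL (l : List Int) : ∀ (V : List Int) (y : Int),
    y ∈ pvNewL V l ↔ y ∈ l ∧ y ∉ V := by
  induction l with
  | nil => intro V y; simp [pvNewL]
  | cons v l ih =>
    intro V y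
    rw [pvNewL_cons]
    by_cases hv : v ∈ V
    · simp only [hv, if_true, ih]
      constructor
      · rintro ⟨h1, h2⟩; exact ⟨List.mem_cons_of_mem _ h1, h2⟩
      · rintro ⟨h1, h2⟩
        rcases List.mem_cons.mp h1 with rfl | h1
        · exact absurd hv h2
        · exact ⟨h1, h2⟩
    · simp only [hv, if_false, List.mem_cons, ih, List.mem_append]
      constructor
      · rintro (rfl | ⟨h1, h2⟩)
        · exact ⟨Or.inl rfl, hv⟩
        · exact ⟨Or.inr h1, fun h => h2 (Or.inl h)⟩
      · rintro ⟨rfl | h1, h2⟩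
        · exact Or.inl rfl
        · by_cases hyv : y = v
          · exact Or.inl hyv
          · refine Or.inr ⟨h1, fun hm => ?_⟩
            rcases hm with hm | hm | hm
            · exact h2 hm
            · exact hyv hm
            · exact absurd hm (List.not_mem_nil)

theorem nodup_pvNewL (l : List Int) : ∀ (V : List Int), (pvNewL V l).Nodup := by
  induction l with
  | nil => intro V; simp [pvNewL]
  | cons v l ih =>
    intro V
    rw [pvNewL_cons]
    by_cases hv : v ∈ V
    · simp [hv, ih]
    · simp only [hv, if_false, List.nodup_cons]
      refine ⟨fun h => ?_, ih _⟩
      have := (mem_pvNewL l (V ++ [v]) v).mp h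
      exact this.2 (by simp)

-- 5: the frontier-level collection fold threads (visited, out) in lockstep
theorem pvCollect_foldl (nbr : Int → List Int) (F : List Int) : ∀ (V A : List Int),
    F.foldl (fun q u => (nbr u).foldl pvStep q) (V, A)
      = (V ++ pvNew nbr V F, A ++ pvNew nbr V F) := by
  induction F with
  | nil => intro V A; simp [pvNew]
  | cons u F ih =>
    intro V A
    have hN : pvNew nbr V (u :: F)
        = pvNewL V (nbr u) ++ pvNew nbr (V ++ pvNewL V (nbr u)) F := by
      simp only [pvNew, List.foldl_cons]
      rw [pvStep_foldl (nbr u) V []]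
      simp only [List.nil_append]
      rw [ih (V ++ pvNewL V (nbr u)) (pvNewL V (nbr u))]
      simp [pvNew]
    rw [List.foldl_cons, pvStep_foldl (nbr u) V A,
        ih (V ++ pvNewL V (nbr u)) (A ++ pvNewL V (nbr u)), hN]
    simp

theorem pvNew_cons (nbr : Int → List Int) (V : List Int) (u : Int) (F : List Int) :
    pvNew nbr V (u :: F) = pvNewL V (nbr u) ++ pvNew nbr (V ++ pvNewL V (nbr u)) F := by
  simp only [pvNew, List.foldl_cons]
  rw [pvStep_foldl (nbr u) V []]
  simp only [List.nil_append]
  rw [pvCollect_foldl nbr F (V ++ pvNewL V (nbr u)) (pvNewL V (nbr u))]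
  simp [pvNew]

theorem mem_pvNew (nbr : Int → List Int) (F : List Int) : ∀ (V : List Int) (y : Int),
    y ∈ pvNew nbr V F ↔ y ∉ V ∧ ∃ u ∈ F, y ∈ nbr u := by
  induction F with
  | nil => intro V y; simp [pvNew]
  | cons u F ih =>
    intro V y
    rw [pvNew_cons]
    simp only [List.mem_append, mem_pvNewL, ih, List.mem_cons]
    constructor
    · rintro (⟨h1, h2⟩ | ⟨h2, w, hw, hy⟩)
      · exact ⟨h2, u, Or.inl rfl, h1⟩
      · exact ⟨fun h => h2 (Or.inl h), w, Or.inr hw, hy⟩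
    · rintro ⟨h2, w, rfl | hw, hy⟩
      · exact Or.inl ⟨hy, h2⟩
      · by_cases hu : y ∈ nbr u
        · exact Or.inl ⟨hu, h2⟩
        · refine Or.inr ⟨fun h => ?_, w, hw, hy⟩
          rcases h with h | ⟨h, _⟩
          · exact h2 h
          · exact hu h

theorem nodup_pvNew (nbr : Int → List Int) (F : List Int) : ∀ (V : List Int),
    (pvNew nbr V F).Nodup := by
  induction F with
  | nil => intro V; simp [pvNew]
  | cons u F ih =>
    intro V
    rw [pvNew_cons]
    refine List.Nodup.append (nodup_pvNewL _ _) (ih _) ?_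
    intro y hy hy'
    have := (mem_pvNew nbr F _ y).mp hy'
    exact this.1 (List.mem_append.mpr (Or.inr hy))

-- A-side: the neighbour-union loop
theorem mem_foldl_update (em : PySem.Dict Int (PySem.Set Int)) (FA : List Int) :
    ∀ (s0 : PySem.Set Int) (y : Int),
    y ∈ FA.foldl (fun s src => PySem.Set.update s (PySem.Dict.getD em src [])) s0
      ↔ y ∈ s0 ∨ ∃ u ∈ FA, y ∈ PySem.Dict.getD em u [] := by
  induction FA with
  | nil => intro s0 y; simp
  | cons u FA ih =>
    intro s0 y
    simp only [List.foldl_cons, ih, PySem.Set.mem_update, List.mem_cons]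
    constructor
    · rintro ((h | h) | ⟨w, hw, hy⟩)
      · exact Or.inl h
      · exact Or.inr ⟨u, Or.inl rfl, h⟩
      · exact Or.inr ⟨w, Or.inr hw, hy⟩
    · rintro (h | ⟨w, rfl | hw, hy⟩)
      · exact Or.inl (Or.inl h)
      · exact Or.inl (Or.inr hy)
      · exact Or.inr ⟨w, hw, hy⟩

theorem nodup_foldl_update (em : PySem.Dict Int (PySem.Set Int)) (FA : List Int) :
    ∀ (s0 : PySem.Set Int), s0.Nodup →
    (FA.foldl (fun s src => PySem.Set.update s (PySem.Dict.getD em src [])) s0).Nodup := by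
  induction FA with
  | nil => intro s0 h; simpa using h
  | cons u FA ih =>
    intro s0 h
    exact ih _ (PySem.Set.nodup_update _ _ h)

-- the two edge maps agree pointwise (as sets), and A's values are Nodup
theorem pvMaps_rel (edges : List (List Int)) :
    ∀ (d1 : PySem.Dict Int (PySem.Set Int)) (d2 : PySem.Dict Int (List Int)),
    (∀ u, (d1.getD u []).Nodup) →
    (∀ u y, y ∈ d1.getD u [] ↔ y ∈ d2.getD u []) →
    (∀ u, ((edges.foldl (fun d e =>
        match e with
        | [src, dst] => PySem.Dict.modify d src [] (fun s => PySem.Set.add s dst)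
        | _ => d) d1).getD u []).Nodup) ∧
    (∀ u y, y ∈ (edges.foldl (fun d e =>
        match e with
        | [src, dst] => PySem.Dict.modify d src [] (fun s => PySem.Set.add s dst)
        | _ => d) d1).getD u []
      ↔ y ∈ (edges.foldl (fun d e =>
        match e with
        | [src, dst] => PySem.Dict.modify d src [] (fun l => l ++ [dst])
        | _ => d) d2).getD u []) := by
  induction edges with
  | nil => intro d1 d2 h1 h2; exact ⟨h1, h2⟩
  | cons e edges ih =>
    intro d1 d2 h1 h2
    rcases e with _ | ⟨s, _ | ⟨t, _ | ⟨c, rest⟩⟩⟩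
    · exact ih d1 d2 h1 h2
    · exact ih d1 d2 h1 h2
    · refine ih _ _ ?_ ?_
      · intro u
        rw [PySem.Dict.getD_modify]
        split_ifs with h
        · exact PySem.Set.nodup_add _ _ (h1 s)
        · exact h1 u
      · intro u y
        rw [PySem.Dict.getD_modify, PySem.Dict.getD_modify]
        split_ifs with h
        · simp [PySem.Set.mem_add, h2 s y]
        · exact h2 u y
    · exact ih d1 d2 h1 h2

theorem pvEmAdj_mem (edges : List (List Int)) (u y : Int) :
    y ∈ (pvGetEdgeMap edges).getD u [] ↔ y ∈ (pvBuildAdj edges).getD u [] := by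
  have := pvMaps_rel edges PySem.Dict.empty PySem.Dict.empty
    (by intro u; simp [PySem.Dict.getD_empty]) (by intro u y; simp [PySem.Dict.getD_empty])
  exact this.2 u y

-- all adjacency values are destinations of edges
theorem pvDsts_cons (e : List Int) (edges : List (List Int)) :
    pvDsts (e :: edges)
      = (match e with | [_, t] => [t] | _ => []) ++ pvDsts edges := by
  rcases e with _ | ⟨s, _ | ⟨t, _ | ⟨c, rest⟩⟩⟩ <;> simp [pvDsts]

theorem pvAdj_sub_dsts_aux (edges : List (List Int)) :
    ∀ (d2 : PySem.Dict Int (List Int)) (u y : Int),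
    y ∈ (edges.foldl (fun d e =>
        match e with
        | [src, dst] => PySem.Dict.modify d src [] (fun l => l ++ [dst])
        | _ => d) d2).getD u []
    → y ∈ d2.getD u [] ∨ y ∈ pvDsts edges := by
  induction edges with
  | nil => intro d2 u y h; exact Or.inl h
  | cons e edges ih =>
    intro d2 u y h
    rw [pvDsts_cons]
    rcases e with _ | ⟨s, _ | ⟨t, _ | ⟨c, rest⟩⟩⟩
    · simpa using ih d2 u y h
    · simpa using ih d2 u y h
    · rcases ih _ u y h with h | h
      · rw [PySem.Dict.getD_modify] at h
        split_ifs at h with hs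
        · rcases List.mem_append.mp h with h | h
          · exact Or.inl (by simpa [hs] using h)
          · simp [List.mem_singleton.mp h]
        · exact Or.inl h
      · simp [h]
    · simpa using ih d2 u y h

theorem pvAdj_sub_dsts (edges : List (List Int)) (u y : Int)
    (h : y ∈ (pvBuildAdj edges).getD u []) : y ∈ pvDsts edges := by
  rcases pvAdj_sub_dsts_aux edges PySem.Dict.empty u y h with h | h
  · simp [PySem.Dict.getD_empty] at h
  · exact h

-- the measure: not-yet-visited distinct destinations
theorem pvMu_drop (pool V N : List Int) (hnd : N.Nodup) (hdisj : ∀ y ∈ N, y ∉ V)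
    (hsub : ∀ y ∈ N, y ∈ pool) : pvMu pool (V ++ N) + N.length ≤ pvMu pool V := by
  have hsplit := (List.filter_append_perm (fun x => decide (x ∈ N))
    ((PySem.Set.ofList pool).filter (fun x => decide (x ∉ V)))).length_eq
  rw [List.length_append] at hsplit
  have h2 : ((PySem.Set.ofList pool).filter (fun x => decide (x ∉ V))).filter
        (fun x => !decide (x ∈ N))
      = (PySem.Set.ofList pool).filter (fun x => decide (x ∉ V ++ N)) := by
    rw [List.filter_filter]
    apply List.filter_congr
    intro x hx
    by_cases hxV : x ∈ V <;> by_cases hxN : x ∈ N <;> simp [hxV, hxN, List.mem_append]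
  have h3 : N.length ≤ (((PySem.Set.ofList pool).filter (fun x => decide (x ∉ V))).filter
      (fun x => decide (x ∈ N))).length := by
    apply List.Subperm.length_le
    apply List.subperm_of_subset hnd
    intro y hy
    simp only [List.mem_filter, decide_eq_true_eq]
    exact ⟨⟨(PySem.Set.mem_ofList pool y).mpr (hsub y hy), hdisj y hy⟩, hy⟩
  unfold pvMu
  rw [← h2]
  omega

theorem pvMu_le (pool V : List Int) : pvMu pool V ≤ pool.length := by
  calc ((PySem.Set.ofList pool).filter _).length ≤ (PySem.Set.ofList pool).length :=
        List.length_filter_le _ _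
    _ ≤ pool.length := PySem.Set.length_ofList_le pool

theorem length_eq_of_nodup_mem (l1 l2 : List Int) (h1 : l1.Nodup) (h2 : l2.Nodup)
    (h : ∀ y, y ∈ l1 ↔ y ∈ l2) : l1.length = l2.length :=
  ((List.perm_ext_iff_of_nodup h1 h2).mpr h).length_eq

theorem eq_nil_iff_of_mem (l1 l2 : List Int) (h : ∀ y, y ∈ l1 ↔ y ∈ l2) :
    l1 = [] ↔ l2 = [] := by
  simp only [List.eq_nil_iff_forall_not_mem]
  exact ⟨fun H a ha => H a ((h a).mpr ha), fun H a ha => H a ((h a).mp ha)⟩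

-- ref is insensitive to the exact fuel once the fuel exceeds the measure
theorem pvRef_congr (nbr : Int → List Int) (pool : List Int)
    (hscope : ∀ u y, y ∈ nbr u → y ∈ pool) :
    ∀ (k f1 f2 : Nat) (V F acc : List Int), pvMu pool V ≤ k →
    pvMu pool V < f1 → pvMu pool V < f2 →
    pvRef nbr f1 V F acc = pvRef nbr f2 V F acc := by
  intro k
  induction k with
  | zero =>
    intro f1 f2 V F acc hk h1 h2
    match f1, f2 with
    | a + 1, b + 1 =>
      simp only [pvRef]
      have hdrop : pvMu pool (V ++ pvNew nbr V F) + (pvNew nbr V F).length ≤ pvMu pool V :=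
        pvMu_drop pool V _ (nodup_pvNew nbr F V)
          (fun y hy => ((mem_pvNew nbr F V y).mp hy).1)
          (fun y hy => by
            obtain ⟨_, u, _, hu⟩ := (mem_pvNew nbr F V y).mp hy
            exact hscope u y hu)
      have hN : pvNew nbr V F = [] := by
        have : (pvNew nbr V F).length = 0 := by omega
        exact List.length_eq_zero_iff.mp this
      simp [hN]
  | succ k ih =>
    intro f1 f2 V F acc hk h1 h2
    match f1, f2 with
    | a + 1, b + 1 =>
      simp only [pvRef]
      have hdrop : pvMu pool (V ++ pvNew nbr V F) + (pvNew nbr V F).length ≤ pvMu pool V :=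
        pvMu_drop pool V _ (nodup_pvNew nbr F V)
          (fun y hy => ((mem_pvNew nbr F V y).mp hy).1)
          (fun y hy => by
            obtain ⟨_, u, _, hu⟩ := (mem_pvNew nbr F V y).mp hy
            exact hscope u y hu)
      by_cases hN : pvNew nbr V F = []
      · simp [hN]
      · have hlen : 1 ≤ (pvNew nbr V F).length := List.length_pos_of_ne_nil hN
        have hE : (pvNew nbr V F).isEmpty = false := by simp [hN]
        simp only [hE, Bool.false_eq_true, if_false]
        exact ih a b _ _ _ (by omega) (by omega) (by omega)

-- one-step unfolding equations (definitional)
theorem pvLoopA_succ (em : PySem.Dict Int (PySem.Set Int)) (fuel : Nat)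
    (visited toVisit : PySem.Set Int) (acc : List Int) :
    pvLoopA em (fuel + 1) visited toVisit acc
      = (let neighbours : PySem.Set Int :=
           toVisit.foldl (fun s src => PySem.Set.update s (PySem.Dict.getD em src []))
             PySem.Set.empty
         let discovered := PySem.Set.diff neighbours visited
         if discovered.isEmpty then acc
         else pvLoopA em fuel (PySem.Set.update visited discovered) discovered
                (acc ++ [PySem.Set.len discovered])) := rfl

theorem pvRef_succ (nbr : Int → List Int) (fuel : Nat) (V F acc : List Int) :
    pvRef nbr (fuel + 1) V F acc
      = (let N := pvNew nbr V F
         if N.isEmpty then acc else pvRef nbr fuel (V ++ N) N (acc ++ [(N.length : Int)])) := rfl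

theorem pvLoopB_succ (adj : PySem.Dict Int (List Int)) (fuel : Nat) (node depth : Int)
    (rest : List (Int × Int)) (V : PySem.Set Int) (C : List Int) :
    pvLoopB adj (fuel + 1) ((node, depth) :: rest) V C
      = (let counts1 :=
           if 0 < depth then
             let c := if (C.length : Int) < depth then C ++ [0] else C
             PySem.List.pySetD c (depth - 1) (PySem.List.pyGetD c (depth - 1) 0 + 1)
           else C
         let qv := (PySem.Dict.getD adj node []).foldl
           (fun (qv : List (Int × Int) × PySem.Set Int) nxt =>
             if PySem.Set.contains qv.2 nxt then qv
             else (qv.1 ++ [(nxt, depth + 1)], PySem.Set.add qv.2 nxt)) (rest, V)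
         pvLoopB adj fuel qv.1 qv.2 counts1) := rfl

theorem pvLoopB_nil (adj : PySem.Dict Int (List Int)) (fuel : Nat)
    (V : PySem.Set Int) (C : List Int) :
    pvLoopB adj (fuel + 1) [] V C = C := rfl

-- port A equals ref, round by round
theorem pvLoopA_eq_ref (em : PySem.Dict Int (PySem.Set Int)) (nbr : Int → List Int)
    (hrel : ∀ u y, y ∈ em.getD u [] ↔ y ∈ nbr u) :
    ∀ (fuel : Nat) (VA FA VB FB acc : List Int), VA.Nodup →
    (∀ y, y ∈ VA ↔ y ∈ VB) → (∀ y, y ∈ FA ↔ y ∈ FB) →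
    pvLoopA em fuel VA FA acc = pvRef nbr fuel VB FB acc := by
  intro fuel
  induction fuel with
  | zero => intro VA FA VB FB acc _ _ _; rfl
  | succ fuel ih =>
    intro VA FA VB FB acc hVA hV hF
    rw [pvLoopA_succ, pvRef_succ]
    simp only []
    set NA := FA.foldl (fun s src => PySem.Set.update s (PySem.Dict.getD em src []))
      PySem.Set.empty with hNA
    set disc := PySem.Set.diff NA VA with hdisc
    set N := pvNew nbr VB FB with hN
    have hmem : ∀ y, y ∈ disc ↔ y ∈ N := by
      intro y
      rw [hdisc, hN, PySem.Set.mem_diff, hNA, mem_foldl_update, mem_pvNew]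
      constructor
      · rintro ⟨h | ⟨u, hu, hy⟩, hv⟩
        · exact absurd h (List.not_mem_nil)
        · exact ⟨fun hb => hv ((hV y).mpr hb), u, (hF u).mp hu, (hrel u y).mp hy⟩
      · rintro ⟨hv, u, hu, hy⟩
        exact ⟨Or.inr ⟨u, (hF u).mpr hu, (hrel u y).mpr hy⟩, fun hb => hv ((hV y).mp hb)⟩
    have hnd : disc.Nodup :=
      PySem.Set.nodup_diff _ _ (nodup_foldl_update em FA PySem.Set.empty List.nodup_nil)
    have hlen : disc.length = N.length :=
      length_eq_of_nodup_mem _ _ hnd (nodup_pvNew nbr FB VB) hmem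
    by_cases hNnil : N = []
    · have hdn : disc = [] := (eq_nil_iff_of_mem disc N hmem).mpr hNnil
      simp [hdn, hNnil]
    · have hdn : disc ≠ [] := fun h => hNnil ((eq_nil_iff_of_mem disc N hmem).mp h)
      have e1 : disc.isEmpty = false := by simp [hdn]
      have e2 : N.isEmpty = false := by simp [hNnil]
      rw [e1, e2]
      simp only [Bool.false_eq_true, if_false]
      have hacc : acc ++ [PySem.Set.len disc] = acc ++ [(N.length : Int)] := by
        simp [PySem.Set.len, hlen]
      rw [hacc]
      apply ih
      · exact PySem.Set.nodup_update _ _ hVA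
      · intro y
        rw [PySem.Set.mem_update, List.mem_append]
        constructor
        · rintro (h | h)
          · exact Or.inl ((hV y).mp h)
          · exact Or.inr ((hmem y).mp h)
        · rintro (h | h)
          · exact Or.inl ((hV y).mpr h)
          · exact Or.inr ((hmem y).mpr h)
      · exact hmem

-- counts bookkeeping on the last cell
theorem pvGetD_concat (C : List Int) (x d : Int) :
    PySem.List.pyGetD (C ++ [x]) ((C.length : Int)) d = x := by
  rw [PySem.List.pyGetD_natCast]
  induction C with
  | nil => simp
  | cons c C ih => simpa using ih

theorem pvSetD_concat (C : List Int) (x v : Int) :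
    PySem.List.pySetD (C ++ [x]) ((C.length : Int)) v = C ++ [v] := by
  rw [PySem.List.pySetD_natCast]
  induction C with
  | nil => simp
  | cons c C ih => simpa using ih

-- B's inner enqueue loop in terms of pvNewL
theorem pvLoopB_fold (l : List Int) : ∀ (q : List (Int × Int)) (V : PySem.Set Int) (dep : Int),
    l.foldl (fun (qv : List (Int × Int) × PySem.Set Int) nxt =>
        if PySem.Set.contains qv.2 nxt then qv
        else (qv.1 ++ [(nxt, dep)], PySem.Set.add qv.2 nxt)) (q, V)
      = (q ++ (pvNewL V l).map (fun v => (v, dep)), V ++ pvNewL V l) := by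
  induction l with
  | nil => intro q V dep; simp [pvNewL]
  | cons v l ih =>
    intro q V dep
    rw [List.foldl_cons, pvNewL_cons]
    by_cases hv : v ∈ V
    · have hc : PySem.Set.contains V v = true := (PySem.Set.contains_iff V v).mpr hv
      simp only [hc, if_true, hv]
      exact ih q V dep
    · have hc : PySem.Set.contains V v = false :=
        Bool.eq_false_iff.mpr (fun h => hv ((PySem.Set.contains_iff V v).mp h))
      simp only [hc, Bool.false_eq_true, if_false, hv]
      rw [PySem.Set.add_of_not_mem hv]
      rw [ih (q ++ [(v, dep)]) (V ++ [v]) dep]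
      simp

-- B processes the remainder of a level
theorem pvBstep (adj : PySem.Dict Int (List Int)) (d : Int) (hd : 1 ≤ d) (C : List Int)
    (hC : (C.length : Int) = d - 1) :
    ∀ (F : List Int) (fuel : Nat) (P : List Int) (V : PySem.Set Int) (j : Int), 1 ≤ j →
    pvLoopB adj (F.length + fuel)
        (F.map (fun u => (u, d)) ++ P.map (fun u => (u, d + 1))) V (C ++ [j])
      = pvLoopB adj fuel
        ((P ++ pvNew (fun u => PySem.Dict.getD adj u []) V F).map (fun u => (u, d + 1)))
        (V ++ pvNew (fun u => PySem.Dict.getD adj u []) V F)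
        (C ++ [j + (F.length : Int)]) := by
  intro F
  induction F with
  | nil =>
    intro fuel P V j hj
    simp [pvNew]
  | cons u F ih =>
    intro fuel P V j hj
    rw [show (u :: F).length + fuel = (F.length + fuel) + 1 by simp [List.length_cons]; omega]
    rw [List.map_cons, List.cons_append, pvLoopB_succ]
    simp only []
    rw [if_pos (by omega : (0:Int) < d)]
    rw [if_neg (by simp; omega : ¬ (((C ++ [j]).length : Int) < d))]
    rw [← hC, pvGetD_concat, pvSetD_concat]
    rw [pvLoopB_fold]
    simp only []
    have hq : (F.map (fun u => (u, d)) ++ P.map (fun u => (u, d + 1)))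
          ++ (pvNewL V (PySem.Dict.getD adj u [])).map (fun v => (v, d + 1))
        = F.map (fun u => (u, d))
          ++ (P ++ pvNewL V (PySem.Dict.getD adj u [])).map (fun u => (u, d + 1)) := by
      simp [List.map_append]
    rw [hq, ih fuel (P ++ pvNewL V (PySem.Dict.getD adj u []))
      (V ++ pvNewL V (PySem.Dict.getD adj u [])) (j + 1) (by omega)]
    rw [pvNew_cons]
    have hcnt : j + 1 + (F.length : Int) = j + (((u :: F).length : Int)) := by
      simp [List.length_cons]; omega
    rw [hcnt]
    simp [List.append_assoc]

-- B processes one whole (nonempty) level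
theorem pvBlevel (adj : PySem.Dict Int (List Int)) (d : Int) (hd : 1 ≤ d) (C : List Int)
    (hC : (C.length : Int) = d - 1) (F : List Int) (hF : F ≠ []) (fuel : Nat)
    (V : PySem.Set Int) :
    pvLoopB adj (F.length + fuel) (F.map (fun u => (u, d))) V C
      = pvLoopB adj fuel
        ((pvNew (fun u => PySem.Dict.getD adj u []) V F).map (fun u => (u, d + 1)))
        (V ++ pvNew (fun u => PySem.Dict.getD adj u []) V F)
        (C ++ [(F.length : Int)]) := by
  rcases F with _ | ⟨u, F⟩
  · exact absurd rfl hF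
  rw [show (u :: F).length + fuel = (F.length + fuel) + 1 by simp [List.length_cons]; omega]
  rw [List.map_cons, pvLoopB_succ]
  simp only []
  rw [if_pos (by omega : (0:Int) < d)]
  rw [if_pos (by omega : ((C.length : Int) < d))]
  rw [← hC, pvGetD_concat, pvSetD_concat]
  rw [pvLoopB_fold]
  simp only []
  norm_num
  rw [pvBstep adj d hd C hC F fuel (pvNewL V (PySem.Dict.getD adj u []))
    (V ++ pvNewL V (PySem.Dict.getD adj u [])) 1 le_rfl]
  rw [pvNew_cons]
  have hcnt : (1 : Int) + (F.length : Int) = (((u :: F).length : Int)) := by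
    simp [List.length_cons]; omega
  rw [hcnt]
  simp [List.append_assoc]

-- B equals ref from any full-level state
theorem pvLoopB_eq_ref (adj : PySem.Dict Int (List Int)) (pool : List Int)
    (hscope : ∀ u y, y ∈ PySem.Dict.getD adj u [] → y ∈ pool) :
    ∀ (k : Nat) (V F C : List Int) (d : Int) (fuel : Nat),
    pvMu pool V ≤ k → pvMu pool V < fuel → 1 ≤ d → (C.length : Int) = d - 1 → F ≠ [] →
    pvLoopB adj (F.length + fuel) (F.map (fun u => (u, d))) V C
      = pvRef (fun u => PySem.Dict.getD adj u []) fuel V F (C ++ [(F.length : Int)]) := by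
  intro k
  induction k with
  | zero =>
    intro V F C d fuel hk hf hd hC hF
    rw [pvBlevel adj d hd C hC F hF fuel V]
    obtain ⟨f, rfl⟩ : ∃ f, fuel = f + 1 := ⟨fuel - 1, by omega⟩
    rw [pvRef_succ]
    simp only []
    have hdrop : pvMu pool (V ++ pvNew (fun u => PySem.Dict.getD adj u []) V F)
        + (pvNew (fun u => PySem.Dict.getD adj u []) V F).length ≤ pvMu pool V :=
      pvMu_drop pool V _ (nodup_pvNew _ F V)
        (fun y hy => ((mem_pvNew _ F V y).mp hy).1)
        (fun y hy => by
          obtain ⟨_, u, _, hu⟩ := (mem_pvNew _ F V y).mp hy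
          exact hscope u y hu)
    have hN : pvNew (fun u => PySem.Dict.getD adj u []) V F = [] := by
      have : (pvNew (fun u => PySem.Dict.getD adj u []) V F).length = 0 := by omega
      exact List.length_eq_zero_iff.mp this
    rw [hN]
    simp [pvLoopB_nil]
  | succ k ih =>
    intro V F C d fuel hk hf hd hC hF
    rw [pvBlevel adj d hd C hC F hF fuel V]
    obtain ⟨f, rfl⟩ : ∃ f, fuel = f + 1 := ⟨fuel - 1, by omega⟩
    rw [pvRef_succ]
    simp only []
    have hdrop : pvMu pool (V ++ pvNew (fun u => PySem.Dict.getD adj u []) V F)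
        + (pvNew (fun u => PySem.Dict.getD adj u []) V F).length ≤ pvMu pool V :=
      pvMu_drop pool V _ (nodup_pvNew _ F V)
        (fun y hy => ((mem_pvNew _ F V y).mp hy).1)
        (fun y hy => by
          obtain ⟨_, u, _, hu⟩ := (mem_pvNew _ F V y).mp hy
          exact hscope u y hu)
    by_cases hN : pvNew (fun u => PySem.Dict.getD adj u []) V F = []
    · rw [hN]
      simp [pvLoopB_nil]
    · have hlen : 1 ≤ (pvNew (fun u => PySem.Dict.getD adj u []) V F).length :=
        List.length_pos_of_ne_nil hN
      have hE : (pvNew (fun u => PySem.Dict.getD adj u []) V F).isEmpty = false := by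
        simp [hN]
      rw [hE]
      simp only [Bool.false_eq_true, if_false]
      have hfuel : f + 1 = (pvNew (fun u => PySem.Dict.getD adj u []) V F).length
          + (f + 1 - (pvNew (fun u => PySem.Dict.getD adj u []) V F).length) := by omega
      rw [hfuel]
      rw [ih (V ++ pvNew (fun u => PySem.Dict.getD adj u []) V F)
        (pvNew (fun u => PySem.Dict.getD adj u []) V F)
        (C ++ [(F.length : Int)]) (d + 1)
        (f + 1 - (pvNew (fun u => PySem.Dict.getD adj u []) V F).length)
        (by omega) (by omega) (by omega)
        (by simp [List.length_append]; omega) hN]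
      exact pvRef_congr (fun u => PySem.Dict.getD adj u []) pool hscope
        (pvMu pool (V ++ pvNew (fun u => PySem.Dict.getD adj u []) V F))
        _ _ _ _ _ le_rfl (by omega) (by omega)

-- ===== VERDICT (by name: the statement is the Claim_ definition above) =====
theorem bfs_spec : Claim_equal_bfs := by
  unfold Claim_equal_bfs Spec_bfs
  intro graph root _ _
  unfold bfs bfs_alt
  cases hE : (PySem.Dict.mk graph).get? "edges" with
  | none => rfl
  | some edges =>
    dsimp only
    have hone : PySem.Set.ofList [root] = [root] :=
      PySem.Set.ofList_eq_self_of_nodup [root] (List.nodup_singleton root)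
    rw [hone]
    have hscope : ∀ u y, y ∈ PySem.Dict.getD (pvBuildAdj edges) u [] → y ∈ pvDsts edges :=
      fun u y h => pvAdj_sub_dsts edges u y h
    have hrel : ∀ u y, y ∈ PySem.Dict.getD (pvGetEdgeMap edges) u []
        ↔ y ∈ PySem.Dict.getD (pvBuildAdj edges) u [] :=
      fun u y => pvEmAdj_mem edges u y
    have hA : pvLoopA (pvGetEdgeMap edges) (edges.length + 1) [root] [root] []
        = pvRef (fun u => PySem.Dict.getD (pvBuildAdj edges) u [])
            (edges.length + 1) [root] [root] [] :=
      pvLoopA_eq_ref (pvGetEdgeMap edges) (fun u => PySem.Dict.getD (pvBuildAdj edges) u [])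
        hrel (edges.length + 1) [root] [root] [root] [root] []
        (by simp) (fun y => Iff.rfl) (fun y => Iff.rfl)
    rw [hA]
    -- B's first step: the root is dequeued at depth 0
    rw [show edges.length + 2 = (edges.length + 1) + 1 from rfl, pvLoopB_succ]
    simp only []
    rw [if_neg (by omega : ¬ (0:Int) < 0), pvLoopB_fold]
    simp only [List.nil_append]
    rw [pvRef_succ]
    simp only []
    have hNN : pvNew (fun u => PySem.Dict.getD (pvBuildAdj edges) u []) [root] [root]
        = pvNewL [root] (PySem.Dict.getD (pvBuildAdj edges) root []) := by
      rw [pvNew_cons]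
      simp [pvNew]
    have hdrop : pvMu (pvDsts edges)
          ([root] ++ pvNewL [root] (PySem.Dict.getD (pvBuildAdj edges) root []))
        + (pvNewL [root] (PySem.Dict.getD (pvBuildAdj edges) root [])).length
        ≤ pvMu (pvDsts edges) [root] :=
      pvMu_drop (pvDsts edges) [root] _ (nodup_pvNewL _ _)
        (fun y hy => ((mem_pvNewL _ _ _).mp hy).2)
        (fun y hy => hscope root y ((mem_pvNewL _ _ _).mp hy).1)
    have hpool : pvMu (pvDsts edges) [root] ≤ edges.length :=
      le_trans (pvMu_le (pvDsts edges) [root]) (List.length_filterMap_le _ _)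
    by_cases hN0 : pvNewL [root] (PySem.Dict.getD (pvBuildAdj edges) root []) = []
    · rw [hNN, hN0]
      simp [pvLoopB_nil]
    · have hlen : 1 ≤ (pvNewL [root] (PySem.Dict.getD (pvBuildAdj edges) root [])).length :=
        List.length_pos_of_ne_nil hN0
      have hE0 : (pvNew (fun u => PySem.Dict.getD (pvBuildAdj edges) u []) [root] [root]).isEmpty
          = false := by simp [hNN, hN0]
      rw [hE0]
      simp only [Bool.false_eq_true, if_false]
      have hfuel : edges.length + 1
          = (pvNewL [root] (PySem.Dict.getD (pvBuildAdj edges) root [])).length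
            + (edges.length + 1
              - (pvNewL [root] (PySem.Dict.getD (pvBuildAdj edges) root [])).length) := by
        omega
      rw [show (0 : Int) + 1 = 1 from rfl, hfuel]
      rw [pvLoopB_eq_ref (pvBuildAdj edges) (pvDsts edges) hscope
        (pvMu (pvDsts edges)
          ([root] ++ pvNewL [root] (PySem.Dict.getD (pvBuildAdj edges) root [])))
        ([root] ++ pvNewL [root] (PySem.Dict.getD (pvBuildAdj edges) root []))
        (pvNewL [root] (PySem.Dict.getD (pvBuildAdj edges) root []))
        [] 1 _
        le_rfl (by omega) le_rfl (by simp) hN0]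
      rw [hNN]
      exact (pvRef_congr (fun u => PySem.Dict.getD (pvBuildAdj edges) u [])
        (pvDsts edges) hscope
        (pvMu (pvDsts edges)
          ([root] ++ pvNewL [root] (PySem.Dict.getD (pvBuildAdj edges) root [])))
        _ _ _ _ _ le_rfl (by omega) (by omega)).symm
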